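-- pv_equiv track=rewrite | github.com/Roshan84ya/data-structure-with-python | string/lucky string.py | smaller
-- ===== SOURCE A (Python) =====
-- def smaller(s1,s2,n1):
--     s1=list(s1)
--     s2=list(s2)
--     s1.sort()
--     s2.sort()
--     i,j,count=0,0,0
--     while i<n1 and j<n1:
--         if s1[i]<s2[j]:
--             count+=1
--             i+=1
--             j+=1
--         elif s2[j]<=s1[i]:
--             j+=1
--     return n1-count
-- ===== SOURCE B (Python) =====
-- def _capped_counts(s, k):
--     # counting sort over the 128-slot ASCII alphabet, then keep the k smallest
--     c = [0] * 128
--     for ch in s: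
--         c[ord(ch)] += 1
--     out = []
--     for cv in c:
--         t = cv if cv < k else k
--         out.append(t)
--         k -= t
--     return out
--
-- def smaller(s1, s2, n1):
--     k = n1 if n1 > 0 else 0
--     a = _capped_counts(s1, k)
--     b = _capped_counts(s2, k)
--     avail = 0
--     count = 0
--     for ca, cb in zip(a, b):
--         m = cb if cb < avail else avail
--         count += m
--         avail += ca - m
--     return n1 - count
-- ===== Notes on version B (the rewrite author's own statement) =====
-- stated objective: faster
-- what changed: Replaces sorting both strings plus a two-pointer scan by a counting sort over the fixed 128-slot ASCII alphabet: count characters, cap the counts to the n1 smallest, then one linear merge over the alphabet with an availability counter.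
-- outside the precondition, e.g. on smaller('z', 'ab', 2): A returns 2, B returns 2
import Mathlib
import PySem

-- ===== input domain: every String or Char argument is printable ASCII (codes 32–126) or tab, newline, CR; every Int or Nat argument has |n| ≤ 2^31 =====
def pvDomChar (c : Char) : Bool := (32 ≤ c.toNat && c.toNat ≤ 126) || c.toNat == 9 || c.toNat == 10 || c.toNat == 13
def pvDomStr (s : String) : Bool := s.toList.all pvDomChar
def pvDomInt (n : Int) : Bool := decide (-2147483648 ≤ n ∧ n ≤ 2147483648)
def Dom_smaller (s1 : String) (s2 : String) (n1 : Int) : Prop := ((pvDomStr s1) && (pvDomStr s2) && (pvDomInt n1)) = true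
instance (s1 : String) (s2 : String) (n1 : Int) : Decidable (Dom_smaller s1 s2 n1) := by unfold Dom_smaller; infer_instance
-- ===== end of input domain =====

-- B replaces sorting both strings + a two-pointer scan by counting sort over the
-- 128-slot ASCII alphabet (count, cap to the n1 smallest, one linear merge).


-- ===== PORT A =====
-- the while-loop: state (i, j, count); terminates because j increases each iteration
def smallerLoop (a b : List Char) (n1 : Int) (i j count : Int) : Int :=
  if _h : i < n1 ∧ j < n1 then
    match PySem.List.pyGet? a i, PySem.List.pyGet? b j with
    | some x, some y =>
        if x < y then smallerLoop a b n1 (i + 1) (j + 1) (count + 1)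
        else if y ≤ x then smallerLoop a b n1 i (j + 1) count
        else count  -- unreachable: chars are totally ordered
    | _, _ => count  -- IndexError in Python; excluded by Pre_smaller
  else count
termination_by (n1 - j).toNat
decreasing_by all_goals omega

def smaller (s1 : String) (s2 : String) (n1 : Int) : Int :=
  let l1 := PySem.List.sorted s1.toList (fun x => x) false
  let l2 := PySem.List.sorted s2.toList (fun x => x) false
  n1 - smallerLoop l1 l2 n1 0 0 0

-- ===== PORT B =====
-- counting sort over the fixed 128-slot ASCII alphabet, then keep the k smallest
def countsList (s : List Char) : List Int :=
  s.foldl (fun c ch => c.modify ch.toNat (· + 1)) (List.replicate 128 (0 : Int))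

def cappedCounts (s : List Char) (k : Int) : List Int :=
  ((countsList s).foldl
    (fun (acc : List Int × Int) cv =>
      let t := if cv < acc.2 then cv else acc.2
      (acc.1 ++ [t], acc.2 - t)) ([], k)).1

def smaller_alt (s1 : String) (s2 : String) (n1 : Int) : Int :=
  let k := if 0 < n1 then n1 else 0
  let a := cappedCounts s1.toList k
  let b := cappedCounts s2.toList k
  let r := (a.zip b).foldl
    (fun (acc : Int × Int) p =>
      let m := if p.2 < acc.1 then p.2 else acc.1
      (acc.1 + p.1 - m, acc.2 + m)) (0, 0)
  n1 - r.2

-- ===== PRECONDITION & SPEC =====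
-- Pre_ excludes inputs with 0 < n1 exceeding a string's length: there A's two-pointer
-- indexing raises IndexError on most such inputs, and whether it returns at all depends
-- on how the greedy run happens to stop, not on a closed-form condition.
def Pre_smaller (s1 : String) (s2 : String) (n1 : Int) : Prop :=
  n1 ≤ 0 ∨ (n1 ≤ PySem.Str.len s1 ∧ n1 ≤ PySem.Str.len s2)
instance (s1 : String) (s2 : String) (n1 : Int) : Decidable (Pre_smaller s1 s2 n1) := by unfold Pre_smaller; infer_instance
def pvWitness_smaller : String × String × Int := ("ba", "cc", 2)
def Spec_smaller (s1 : String) (s2 : String) (n1 : Int) (out : Int) : Prop := out = smaller_alt s1 s2 n1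
instance (s1 : String) (s2 : String) (n1 : Int) (out : Int) : Decidable (Spec_smaller s1 s2 n1 out) := by unfold Spec_smaller; infer_instance

-- ===== CLAIM (what is proved, stated in full; the proofs are below) =====
def Claim_equal_smaller : Prop := ∀ (s1 : String) (s2 : String) (n1 : Int), Dom_smaller s1 s2 n1 → Pre_smaller s1 s2 n1 → Spec_smaller s1 s2 n1 (smaller s1 s2 n1)

-- ===== LEMMAS AND PROOFS =====

-- the greedy matcher both programs compute, as a structural recursion
def gg : List Char → List Char → Int
  | _, [] => 0
  | [], _ :: _ => 0
  | x :: xs, y :: ys => if x < y then 1 + gg xs ys else gg (x :: xs) ys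
termination_by _ b => b.length

-- recursion forms of B's two folds
def capList : Int → List Int → List Int
  | _, [] => []
  | k, c :: cs => (if c < k then c else k) :: capList (k - (if c < k then c else k)) cs

def matched : Int → List (Int × Int) → Int
  | _, [] => 0
  | avail, (ca, cb) :: l =>
      (if cb < avail then cb else avail) +
        matched (avail - (if cb < avail then cb else avail) + ca) l

-- the sorted character list a counts vector denotes
def expand : Nat → List Int → List Char
  | _, [] => []
  | v, c :: cs => List.replicate c.toNat (Char.ofNat v) ++ expand (v + 1) cs

theorem gg_nil_left (b : List Char) : gg [] b = 0 := by cases b <;> simp [gg]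

theorem gg_nil_right (a : List Char) : gg a [] = 0 := by simp [gg]

theorem char_lt_iff (a b : Char) : a < b ↔ a.toNat < b.toNat := by
  rw [Char.lt_def, UInt32.lt_iff_toNat_lt]; rfl

theorem char_le_iff (a b : Char) : a ≤ b ↔ a.toNat ≤ b.toNat := by
  rw [Char.le_def, UInt32.le_iff_toNat_le]; rfl

theorem toNat_ofNat_of_lt (v : Nat) (h : v < 128) : (Char.ofNat v).toNat = v := by
  have hv : Nat.isValidChar v := Or.inl (by omega)
  simp [Char.ofNat, hv, Char.toNat, Char.ofNatAux]

theorem ofNat_inj_of_lt (v : Nat) (h : v < 128) (x : Char) : Char.ofNat v = x ↔ x.toNat = v := by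
  constructor
  · intro he; rw [← he, toNat_ofNat_of_lt v h]
  · intro he; rw [← he, Char.ofNat_toNat]

-- A's loop is gg on the n1-prefixes of the lists, from offsets i and j
theorem loop_eq_gg (a b : List Char) (n1 : Int)
    (ha : n1 ≤ (a.length : Int)) (hb : n1 ≤ (b.length : Int)) :
    ∀ (i j count : Int), 0 ≤ i → i ≤ j →
      smallerLoop a b n1 i j count =
        count + gg ((a.take n1.toNat).drop i.toNat) ((b.take n1.toNat).drop j.toNat) := by
  have main : ∀ (f : Nat) (i j count : Int), (n1 - j).toNat ≤ f → 0 ≤ i → i ≤ j →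
      smallerLoop a b n1 i j count =
        count + gg ((a.take n1.toNat).drop i.toNat) ((b.take n1.toNat).drop j.toNat) := by
    intro f
    induction f with
    | zero =>
      intro i j count hf h0 hij
      rw [smallerLoop.eq_def, dif_neg (by omega)]
      have hd : (b.take n1.toNat).drop j.toNat = [] := by
        apply List.drop_eq_nil_of_le; simp [List.length_take]; omega
      rw [hd, gg_nil_right]; omega
    | succ f ih =>
      intro i j count hf h0 hij
      rw [smallerLoop.eq_def]
      by_cases h : i < n1 ∧ j < n1
      · obtain ⟨hi, hj⟩ := h
        rw [dif_pos ⟨hi, hj⟩]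
        have hia : i.toNat < a.length := by omega
        have hjb : j.toNat < b.length := by omega
        have hga : ∀ (n : Nat) (hn : n < a.length), i = (n : Int) →
            PySem.List.pyGet? a i = some (a[n]'hn) := by
          rintro n hn rfl
          rw [PySem.List.pyGet?_natCast, List.getElem?_eq_getElem]
        have hgb : ∀ (n : Nat) (hn : n < b.length), j = (n : Int) →
            PySem.List.pyGet? b j = some (b[n]'hn) := by
          rintro n hn rfl
          rw [PySem.List.pyGet?_natCast, List.getElem?_eq_getElem]
        have hga := hga i.toNat hia (by omega)
        have hgb := hgb j.toNat hjb (by omega)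
        rw [hga, hgb]
        have hta : (a.take n1.toNat).drop i.toNat
            = a[i.toNat]'hia :: (a.take n1.toNat).drop (i.toNat + 1) := by
          rw [List.drop_eq_getElem_cons (by simp [List.length_take]; omega)]
          congr 1
          exact List.getElem_take
        have htb : (b.take n1.toNat).drop j.toNat
            = b[j.toNat]'hjb :: (b.take n1.toNat).drop (j.toNat + 1) := by
          rw [List.drop_eq_getElem_cons (by simp [List.length_take]; omega)]
          congr 1
          exact List.getElem_take
        rw [hta, htb]
        by_cases hxy : a[i.toNat]'hia < b[j.toNat]'hjb
        · simp only [hxy, if_true, gg]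
          rw [ih (i + 1) (j + 1) (count + 1) (by omega) (by omega) (by omega)]
          have e1 : (i + 1).toNat = i.toNat + 1 := by omega
          have e2 : (j + 1).toNat = j.toNat + 1 := by omega
          rw [e1, e2]; ring
        · have hyx : b[j.toNat]'hjb ≤ a[i.toNat]'hia := le_of_not_gt hxy
          simp only [hxy, if_false, hyx, if_true, gg]
          rw [ih i (j + 1) count (by omega) (by omega) (by omega)]
          have e2 : (j + 1).toNat = j.toNat + 1 := by omega
          rw [e2, ← hta]
      · rw [dif_neg h]
        rcases not_and_or.mp h with h' | h'
        · have hd : (a.take n1.toNat).drop i.toNat = [] := by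
            apply List.drop_eq_nil_of_le; simp [List.length_take]; omega
          rw [hd, gg_nil_left]; omega
        · have hd : (b.take n1.toNat).drop j.toNat = [] := by
            apply List.drop_eq_nil_of_le; simp [List.length_take]; omega
          rw [hd, gg_nil_right]; omega
  intro i j count h0 hij
  exact main (n1 - j).toNat i j count le_rfl h0 hij

theorem countsList_length (s : List Char) : (countsList s).length = 128 := by
  have aux : ∀ (s : List Char) (init : List Int),
      (s.foldl (fun c ch => c.modify ch.toNat (· + 1)) init).length = init.length := by
    intro s
    induction s with
    | nil => intro init; rfl
    | cons ch s ih => intro init; simp [List.foldl_cons, ih]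
  simpa [countsList] using aux s (List.replicate 128 0)

theorem countsList_get (s : List Char) (h128 : ∀ ch ∈ s, ch.toNat < 128)
    (w : Nat) (hw : w < 128) :
    (countsList s).getD w 0 = (s.count (Char.ofNat w) : Int) := by
  have aux : ∀ (s : List Char) (init : List Int), init.length = 128 →
      (∀ ch ∈ s, ch.toNat < 128) →
      (s.foldl (fun c ch => c.modify ch.toNat (· + 1)) init).getD w 0
        = init.getD w 0 + (s.count (Char.ofNat w) : Int) := by
    intro s
    induction s with
    | nil => intro init _ _; simp
    | cons ch s ih =>
      intro init hlen hc
      have hch : ch.toNat < 128 := hc ch (by simp)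
      rw [List.foldl_cons, ih (init.modify ch.toNat (· + 1)) (by simp [hlen])
        (fun c hcm => hc c (by simp [hcm]))]
      rw [List.getD_eq_getElem?_getD, List.getElem?_modify,
        List.getElem?_eq_getElem (show w < init.length by omega), List.count_cons,
        List.getD_eq_getElem init 0 (show w < init.length by omega)]
      by_cases he : ch.toNat = w
      · have hbeq : (ch == Char.ofNat w) = true := by
          rw [beq_iff_eq, ← he, Char.ofNat_toNat]
        simp only [he, if_true, hbeq, Functor.map, Option.map_some, Option.getD_some]
        push_cast
        ring_nf
      · have hbeq : (ch == Char.ofNat w) = false := by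
          rw [beq_eq_false_iff_ne]
          intro hcontra
          exact he (by rw [hcontra, toNat_ofNat_of_lt w hw])
        simp only [he, if_false, hbeq, Functor.map, Option.map_some, Option.getD_some]
        push_cast
        ring_nf
  have h0 : (List.replicate 128 (0 : Int)).getD w 0 = 0 := by
    rw [List.getD_eq_getElem _ _ (by simpa using hw)]
    exact List.getElem_replicate _
  unfold countsList
  rw [aux s _ (by simp) h128, h0, zero_add]

theorem countsList_nonneg (s : List Char) (h128 : ∀ ch ∈ s, ch.toNat < 128) :
    ∀ e ∈ countsList s, 0 ≤ e := by
  intro e he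
  rcases List.mem_iff_getElem.mp he with ⟨w, hwl, rfl⟩
  have hw : w < 128 := by rw [countsList_length] at hwl; exact hwl
  rw [← List.getD_eq_getElem (countsList s) 0 hwl, countsList_get s h128 w hw]
  exact Int.natCast_nonneg _

theorem cappedCounts_eq (s : List Char) (k : Int) :
    cappedCounts s k = capList k (countsList s) := by
  have aux : ∀ (l : List Int) (out : List Int) (k : Int),
      (l.foldl (fun (acc : List Int × Int) cv =>
        let t := if cv < acc.2 then cv else acc.2
        (acc.1 ++ [t], acc.2 - t)) (out, k)).1 = out ++ capList k l := by
    intro l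
    induction l with
    | nil => intro out k; simp [capList]
    | cons c cs ih => intro out k; simp [List.foldl_cons, capList, ih]
  simpa [cappedCounts] using aux (countsList s) [] k

theorem merge_eq_matched (l : List (Int × Int)) :
    ∀ (avail count : Int),
      (l.foldl (fun (acc : Int × Int) p =>
        let m := if p.2 < acc.1 then p.2 else acc.1
        (acc.1 + p.1 - m, acc.2 + m)) (avail, count)).2 = count + matched avail l := by
  induction l with
  | nil => intro avail count; simp [matched]
  | cons p l ih =>
    intro avail count
    obtain ⟨ca, cb⟩ := p
    simp only [List.foldl_cons, matched, ih]
    ring_nf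

theorem capList_length (k : Int) (c : List Int) : (capList k c).length = c.length := by
  induction c generalizing k with
  | nil => rfl
  | cons c0 cs ih => simp [capList, ih]

theorem capList_nonneg (k : Int) (c : List Int) (hk : 0 ≤ k) (hc : ∀ e ∈ c, 0 ≤ e) :
    ∀ e ∈ capList k c, 0 ≤ e := by
  induction c generalizing k with
  | nil => simp [capList]
  | cons c0 cs ih =>
    intro e he
    have hc0 : 0 ≤ c0 := hc c0 (by simp)
    rw [capList] at he
    rcases List.mem_cons.mp he with rfl | he'
    · split_ifs <;> omega
    · refine ih _ (by split_ifs <;> omega) (fun e' he'' => hc e' (by simp [he''])) e he'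

theorem mem_expand (v : Nat) (c : List Int) (hv : v + c.length ≤ 128) :
    ∀ x ∈ expand v c, v ≤ x.toNat ∧ x.toNat < v + c.length := by
  induction c generalizing v with
  | nil => simp [expand]
  | cons c0 cs ih =>
    intro x hx
    rw [expand] at hx
    rcases List.mem_append.mp hx with hx' | hx'
    · have := List.eq_of_mem_replicate hx'
      subst this
      rw [toNat_ofNat_of_lt v (by simp at hv; omega)]
      simp
    · have := ih (v + 1) (by simp at hv ⊢; omega) x hx'
      simp at this ⊢; omega

theorem expand_pairwise (v : Nat) (c : List Int) (hv : v + c.length ≤ 128) :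
    (expand v c).Pairwise (· ≤ ·) := by
  induction c generalizing v with
  | nil => simp [expand]
  | cons c0 cs ih =>
    rw [expand, List.pairwise_append]
    refine ⟨List.pairwise_replicate.mpr (Or.inr le_rfl), ih (v + 1) (by simp at hv ⊢; omega), ?_⟩
    intro x hx y hy
    have hxv := List.eq_of_mem_replicate hx
    subst hxv
    have hyv := (mem_expand (v + 1) cs (by simp at hv ⊢; omega) y hy).1
    rw [char_le_iff, toNat_ofNat_of_lt v (by simp at hv; omega)]
    omega

theorem count_expand (v : Nat) (c : List Int) (hv : v + c.length ≤ 128) (x : Char) :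
    List.count x (expand v c) =
      if v ≤ x.toNat ∧ x.toNat < v + c.length then (c.getD (x.toNat - v) 0).toNat else 0 := by
  induction c generalizing v with
  | nil => simp [expand]
  | cons c0 cs ih =>
    rw [expand, List.count_append, List.count_replicate, ih (v + 1) (by simp at hv ⊢; omega)]
    have hv128 : v < 128 := by simp at hv; omega
    by_cases he : x.toNat = v
    · have hb : (Char.ofNat v == x) = true := by
        rw [beq_iff_eq, ofNat_inj_of_lt v hv128 x, he]
      rw [if_pos hb]
      have h1 : ¬ (v + 1 ≤ x.toNat ∧ x.toNat < v + 1 + cs.length) := by omega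
      rw [if_neg h1, if_pos (by simp; omega)]
      simp [he]
    · have hb : (Char.ofNat v == x) = false := by
        rw [beq_eq_false_iff_ne]
        intro hcontra
        exact he ((ofNat_inj_of_lt v hv128 x).mp hcontra)
      rw [if_neg (by simp [hb])]
      by_cases h2 : v ≤ x.toNat ∧ x.toNat < v + (c0 :: cs).length
      · have h1 : v + 1 ≤ x.toNat ∧ x.toNat < v + 1 + cs.length := by simp at h2; omega
        rw [if_pos h1, if_pos h2]
        have hidx : x.toNat - v = (x.toNat - (v + 1)) + 1 := by omega
        rw [hidx, List.getD_cons_succ]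
        omega
      · have h1 : ¬ (v + 1 ≤ x.toNat ∧ x.toNat < v + 1 + cs.length) := by simp at h2 ⊢; omega
        rw [if_neg h1, if_neg h2]

theorem take_expand (v : Nat) (c : List Int) (k : Int) (hk : 0 ≤ k) (hc : ∀ e ∈ c, 0 ≤ e) :
    (expand v c).take k.toNat = expand v (capList k c) := by
  induction c generalizing v k with
  | nil => simp [expand, capList]
  | cons c0 cs ih =>
    have hc0 : 0 ≤ c0 := hc c0 (by simp)
    rw [expand, capList, expand, List.take_append, List.take_replicate, List.length_replicate]
    have e1 : min k.toNat c0.toNat = (if c0 < k then c0 else k).toNat := by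
      split_ifs <;> omega
    have e2 : k.toNat - c0.toNat = (k - (if c0 < k then c0 else k)).toNat := by
      split_ifs <;> omega
    rw [e1, e2, ih (v + 1) _ (by split_ifs <;> omega) (fun e he => hc e (by simp [he]))]

theorem gg_pad_short (pad : List Char) :
    ∀ (rest b : List Char), pad.length ≤ b.length → (∀ p ∈ pad, ∀ q ∈ b, p < q) →
      gg (pad ++ rest) b = (pad.length : Int) + gg rest (b.drop pad.length) := by
  induction pad with
  | nil => intro rest b _ _; simp
  | cons p pr ih =>
    intro rest b hlen hcross
    cases b with
    | nil => simp at hlen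
    | cons y ys =>
      have hpy : p < y := hcross p (by simp) y (by simp)
      rw [List.cons_append, gg, if_pos hpy,
        ih rest ys (by simpa using hlen) (fun p' hp' q hq => hcross p' (by simp [hp']) q (by simp [hq]))]
      simp only [List.length_cons, List.drop_succ_cons]
      push_cast
      ring_nf

theorem gg_skip (l : List Char) (y : Char) (ys : List Char) (h : ∀ x ∈ l, y ≤ x) :
    gg l (y :: ys) = gg l ys := by
  cases l with
  | nil => rw [gg_nil_left, gg_nil_left]
  | cons x xs =>
    have : ¬ x < y := not_lt.mpr (h x (by simp))
    rw [gg, if_neg this]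

theorem gg_skip_block (n : Nat) (y : Char) (l b : List Char) (h : ∀ x ∈ l, y ≤ x) :
    gg l (List.replicate n y ++ b) = gg l b := by
  induction n with
  | zero => simp
  | succ n ih => rw [List.replicate_succ, List.cons_append, gg_skip l y _ h, ih]

theorem length_expand (v : Nat) (c : List Int) :
    (expand v c).length = (c.map Int.toNat).sum := by
  induction c generalizing v with
  | nil => simp [expand]
  | cons c0 cs ih => simp [expand, ih]

theorem matched_eq_gg : ∀ (ca cb : List Int) (v : Nat) (pad : List Char),
    ca.length = cb.length → v + ca.length ≤ 128 →
    (∀ e ∈ ca, 0 ≤ e) → (∀ e ∈ cb, 0 ≤ e) →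
    (∀ p ∈ pad, p.toNat < v) →
    matched (pad.length : Int) (ca.zip cb) = gg (pad ++ expand v ca) (expand v cb) := by
  intro ca
  induction ca with
  | nil =>
    intro cb v pad hlen _ _ _ _
    have : cb = [] := List.eq_nil_of_length_eq_zero (by simp at hlen; omega)
    subst this
    simp [matched, expand, gg_nil_right]
  | cons a0 ca' ih =>
    intro cb v pad hlen hv ha hb hpad
    cases cb with
    | nil => simp at hlen
    | cons b0 cb' =>
      have hv128 : v < 128 := by simp at hv; omega
      have ha0 : 0 ≤ a0 := ha a0 (by simp)
      have hb0 : 0 ≤ b0 := hb b0 (by simp)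
      have hcv : (Char.ofNat v).toNat = v := toNat_ofNat_of_lt v hv128
      rw [List.zip_cons_cons, matched, expand, expand]
      -- all pad chars are smaller than every char of the b-expansion
      have hcross : ∀ p ∈ pad,
          ∀ q ∈ List.replicate b0.toNat (Char.ofNat v) ++ expand (v + 1) cb', p < q := by
        intro p hp q hq
        have hq' : v ≤ q.toNat := by
          rcases List.mem_append.mp hq with hq' | hq'
          · rw [List.eq_of_mem_replicate hq', hcv]
          · have := (mem_expand (v + 1) cb' (by simp at hv hlen ⊢; omega) q hq').1
            omega
        rw [char_lt_iff]
        have := hpad p hp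
        omega
      by_cases hcase : b0 < (pad.length : Int)
      · -- enough leftover smaller chars: the whole b0-block is matched
        have hsplit : pad = pad.take b0.toNat ++ pad.drop b0.toNat := (List.take_append_drop _ _).symm
        have hlu : (pad.take b0.toNat).length = b0.toNat := by simp; omega
        rw [if_pos hcase]
        conv_rhs => rw [hsplit]
        rw [List.append_assoc,
          gg_pad_short (pad.take b0.toNat) _ _
            (by rw [hlu]; simp)
            (fun p hp q hq => hcross p (List.mem_of_mem_take hp) q hq),
          hlu]
        have hdropb : (List.replicate b0.toNat (Char.ofNat v) ++ expand (v + 1) cb').drop b0.toNat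
            = expand (v + 1) cb' := by
          simp
        rw [hdropb, ← List.append_assoc]
        have hih := ih cb' (v + 1) (pad.drop b0.toNat ++ List.replicate a0.toNat (Char.ofNat v))
          (by simp at hlen ⊢; omega) (by simp at hv ⊢; omega)
          (fun e he => ha e (by simp [he])) (fun e he => hb e (by simp [he]))
          (by
            intro p hp
            rcases List.mem_append.mp hp with hp' | hp'
            · have := hpad p (List.mem_of_mem_drop hp')
              omega
            · rw [List.eq_of_mem_replicate hp', hcv]
              omega)
        rw [← hih]
        have hlen2 : ((pad.drop b0.toNat ++ List.replicate a0.toNat (Char.ofNat v)).length : Int)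
            = (pad.length : Int) - b0 + a0 := by
          simp; omega
        rw [hlen2]
        have hb0' : ((b0.toNat : Nat) : Int) = b0 := by omega
        rw [hb0']
      · -- all leftover smaller chars are used up; rest of the b0-block is skipped
        rw [if_neg hcase]
        rw [gg_pad_short pad _ _ (by simp [length_expand]; omega) hcross]
        have hdropb : (List.replicate b0.toNat (Char.ofNat v) ++ expand (v + 1) cb').drop pad.length
            = List.replicate (b0.toNat - pad.length) (Char.ofNat v) ++ expand (v + 1) cb' := by
          rw [List.drop_append, List.drop_replicate, List.length_replicate]
          have h0 : pad.length - b0.toNat = 0 := by omega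
          rw [h0, List.drop_zero]
        rw [hdropb,
          gg_skip_block _ (Char.ofNat v) _ _
            (by
              intro x hx
              rcases List.mem_append.mp hx with hx' | hx'
              · rw [List.eq_of_mem_replicate hx']
              · have := (mem_expand (v + 1) ca' (by simp at hv ⊢; omega) x hx').1
                rw [char_le_iff, hcv]
                omega)]
        have hih := ih cb' (v + 1) (List.replicate a0.toNat (Char.ofNat v))
          (by simp at hlen ⊢; omega) (by simp at hv ⊢; omega)
          (fun e he => ha e (by simp [he])) (fun e he => hb e (by simp [he]))
          (by
            intro p hp
            rw [List.eq_of_mem_replicate hp, hcv]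
            omega)
        rw [List.length_replicate] at hih
        have e1 : ((pad.length : Int) - (pad.length : Int) + a0) = (a0.toNat : Int) := by omega
        rw [e1, hih]

theorem sorted_eq_expand (s : List Char) (h128 : ∀ ch ∈ s, ch.toNat < 128) :
    PySem.List.sorted s (fun x => x) false = expand 0 (countsList s) := by
  apply PySem.List.sorted_id_eq_of_perm_of_pairwise
  · rw [List.perm_iff_count]
    intro x
    rw [count_expand 0 (countsList s) (by simp [countsList_length]) x]
    by_cases hx : x.toNat < 128
    · rw [if_pos (by simp [countsList_length]; omega)]
      have hg := countsList_get s h128 x.toNat hx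
      rw [Nat.sub_zero, hg, Char.ofNat_toNat]
      simp
    · rw [if_neg (by simp [countsList_length]; omega)]
      symm
      rw [List.count_eq_zero]
      intro hmem
      exact hx (h128 x hmem)
  · exact expand_pairwise 0 (countsList s) (by simp [countsList_length])

theorem dom_codes (s : String) (h : pvDomStr s = true) : ∀ ch ∈ s.toList, ch.toNat < 128 := by
  intro ch hch
  have := List.all_eq_true.mp h ch hch
  simp [pvDomChar] at this
  omega

-- ===== VERDICT (by name: the statement is the Claim_ definition above) =====
theorem smaller_spec : Claim_equal_smaller := by
  intro s1 s2 n1 hdom hpre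
  unfold Spec_smaller
  simp only [smaller, smaller_alt]
  have hdom' : pvDomStr s1 = true ∧ pvDomStr s2 = true := by
    unfold Dom_smaller at hdom
    simp at hdom
    exact ⟨hdom.1.1, hdom.1.2⟩
  have h1 := dom_codes s1 hdom'.1
  have h2 := dom_codes s2 hdom'.2
  set k : Int := if 0 < n1 then n1 else 0 with hkdef
  have hk0 : 0 ≤ k := by rw [hkdef]; split_ifs <;> omega
  have hkn : k.toNat = n1.toNat := by rw [hkdef]; split_ifs <;> omega
  have hlen1 : n1 ≤ ((s1.toList.length : Nat) : Int) ∧ n1 ≤ ((s2.toList.length : Nat) : Int) := by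
    rcases hpre with h | ⟨ha, hb⟩
    · constructor <;> omega
    · rw [PySem.Str.len_eq] at ha hb
      exact ⟨ha, hb⟩
  -- A side
  rw [loop_eq_gg _ _ n1 (by rw [PySem.List.length_sorted]; exact hlen1.1)
      (by rw [PySem.List.length_sorted]; exact hlen1.2) 0 0 0 le_rfl le_rfl]
  simp only [Int.toNat_zero, List.drop_zero, zero_add]
  -- B side
  rw [cappedCounts_eq, cappedCounts_eq, merge_eq_matched, zero_add]
  -- identify both with gg of capped expansions
  have hs1 := sorted_eq_expand s1.toList h1
  have hs2 := sorted_eq_expand s2.toList h2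
  have hm := matched_eq_gg (capList k (countsList s1.toList)) (capList k (countsList s2.toList)) 0 []
    (by rw [capList_length, capList_length, countsList_length, countsList_length])
    (by rw [capList_length, countsList_length])
    (capList_nonneg k _ hk0 (countsList_nonneg _ h1))
    (capList_nonneg k _ hk0 (countsList_nonneg _ h2))
    (by simp)
  simp only [List.length_nil, Nat.cast_zero, List.nil_append] at hm
  rw [hm, hs1, hs2,
    ← take_expand 0 _ k hk0 (countsList_nonneg _ h1),
    ← take_expand 0 _ k hk0 (countsList_nonneg _ h2), hkn]
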